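-- pv_equiv track=rewrite | github.com/teyter/bioinfo | book/FrequentWords.py | MaxMap
-- ===== SOURCE A (Python) =====
-- def MaxMap(freqMap):
--     maxFreq = 0
--     fmlen = len(freqMap)
--     for i in range(fmlen):
--         freq = freqMap[i][0]
--         if freq > maxFreq:
--             maxFreq = freq
--     ret = []
--     for j in range(fmlen):
--         freq = freqMap[j][0]
--         item = freqMap[j][1]
--         if freq == maxFreq:
--             ret.append(item)
--     return ret
-- ===== SOURCE B (Python) =====
-- def MaxMap(freqMap):
--     best = 0
--     items = []
--     for freq, item in freqMap:
--         if freq > best: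
--             best = freq
--             items = [item]
--         elif freq == best:
--             items.append(item)
--     return items
-- ===== Notes on version B (the rewrite author's own statement) =====
-- stated objective: simpler
-- what changed: Replaced A's two index-based scans (one to find the max frequency floored at 0, one to collect matching items) by a single pass that maintains the running best frequency and the list of items attaining it, resetting the list whenever a larger frequency appears.
import Mathlib
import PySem

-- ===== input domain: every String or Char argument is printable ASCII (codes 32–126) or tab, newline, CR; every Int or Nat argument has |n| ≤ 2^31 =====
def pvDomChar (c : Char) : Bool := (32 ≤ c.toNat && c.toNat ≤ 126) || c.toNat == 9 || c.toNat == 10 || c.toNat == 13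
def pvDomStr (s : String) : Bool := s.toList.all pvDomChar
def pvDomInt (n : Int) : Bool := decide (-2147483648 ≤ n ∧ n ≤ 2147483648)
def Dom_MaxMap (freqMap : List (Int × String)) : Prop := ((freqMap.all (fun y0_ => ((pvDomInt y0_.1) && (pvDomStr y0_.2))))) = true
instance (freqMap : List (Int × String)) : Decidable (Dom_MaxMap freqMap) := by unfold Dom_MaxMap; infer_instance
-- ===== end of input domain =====

-- B replaces A's two index scans by one pass keeping the running best frequency and its items (objective: simpler).
-- ===== PORT A =====
def MaxMap (freqMap : List (Int × String)) : List String :=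
  let fmlen : Int := freqMap.length
  let maxFreq : Int :=
    (PySem.List.pyRange 0 fmlen 1).foldl
      (fun maxFreq i =>
        let freq := (PySem.List.pyGetD freqMap i (0, "")).1
        if freq > maxFreq then freq else maxFreq) 0
  (PySem.List.pyRange 0 fmlen 1).foldl
    (fun ret j =>
      let freq := (PySem.List.pyGetD freqMap j (0, "")).1
      let item := (PySem.List.pyGetD freqMap j (0, "")).2
      if freq == maxFreq then ret ++ [item] else ret) []

-- ===== PORT B =====
def MaxMap_alt (freqMap : List (Int × String)) : List String :=
  (freqMap.foldl
    (fun (st : Int × List String) p =>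
      if p.1 > st.1 then (p.1, [p.2])
      else if p.1 == st.1 then (st.1, st.2 ++ [p.2])
      else st) (0, [])).2

-- ===== PRECONDITION & SPEC =====
def Spec_MaxMap (freqMap : List (Int × String)) (out : List String) : Prop := out = MaxMap_alt freqMap
instance (freqMap : List (Int × String)) (out : List String) : Decidable (Spec_MaxMap freqMap out) := by unfold Spec_MaxMap; infer_instance

-- ===== CLAIM (what is proved, stated in full; the proofs are below) =====
def Claim_equal_MaxMap : Prop := ∀ (freqMap : List (Int × String)), Dom_MaxMap freqMap → Spec_MaxMap freqMap (MaxMap freqMap)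

-- ===== LEMMAS AND PROOFS =====

-- step function of B's single pass
def pvStep (st : Int × List String) (p : Int × String) : Int × List String :=
  if p.1 > st.1 then (p.1, [p.2])
  else if p.1 == st.1 then (st.1, st.2 ++ [p.2])
  else st

-- the running max A's first loop computes, started at b
def pvFMax (xs : List (Int × String)) (b : Int) : Int :=
  xs.foldl (fun m p => if p.1 > m then p.1 else m) b

lemma pvFMax_le (xs : List (Int × String)) (b : Int) : b ≤ pvFMax xs b := by
  induction xs generalizing b with
  | nil => simp [pvFMax]
  | cons x xs ih =>
    simp only [pvFMax, List.foldl_cons]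
    split_ifs with h
    · exact le_of_lt (lt_of_lt_of_le h (ih x.1))
    · exact ih b

lemma pvFMax_cons_gt (x : Int × String) (xs : List (Int × String)) (b : Int)
    (h : x.1 > b) : pvFMax (x :: xs) b = pvFMax xs x.1 := by
  simp [pvFMax, h]

lemma pvFMax_cons_le (x : Int × String) (xs : List (Int × String)) (b : Int)
    (h : ¬ x.1 > b) : pvFMax (x :: xs) b = pvFMax xs b := by
  simp [pvFMax, h]

-- invariant of B's fold: first component is the running max, second is the kept
-- accumulator (kept iff the max never moved) followed by the items attaining the max
lemma pvFold_char (xs : List (Int × String)) (b : Int) (acc : List String) :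
    xs.foldl pvStep (b, acc) =
      (pvFMax xs b,
       (if b = pvFMax xs b then acc else []) ++
         (xs.filter (fun p => p.1 == pvFMax xs b)).map Prod.snd) := by
  induction xs generalizing b acc with
  | nil => simp [pvFMax]
  | cons x xs ih =>
    rcases x with ⟨f, s⟩
    by_cases h : f > b
    · have h1 : pvStep (b, acc) (f, s) = (f, [s]) := by simp [pvStep, h]
      have hbne : ¬ b = pvFMax xs f := by have := pvFMax_le xs f; omega
      rw [List.foldl_cons, h1, ih, pvFMax_cons_gt ⟨f, s⟩ xs b h]
      refine Prod.ext rfl ?_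
      simp only [List.filter_cons, if_neg hbne, List.nil_append]
      by_cases hx : f = pvFMax xs f
      · have hb2 : ((f, s).1 == pvFMax xs f) = true := by simpa using hx
        simp [hb2, if_pos hx]
      · simp [hx]
    · rw [pvFMax_cons_le ⟨f, s⟩ xs b h]
      by_cases he : f = b
      · have h1 : pvStep (b, acc) (f, s) = (b, acc ++ [s]) := by
          simp [pvStep, he]
        rw [List.foldl_cons, h1, ih]
        refine Prod.ext rfl ?_
        by_cases hb : b = pvFMax xs b
        · have hfM : ((f, s).1 == pvFMax xs b) = true := by
            simp only [beq_iff_eq]; rw [he]; exact hb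
          simp only [List.filter_cons, hfM, if_pos hb, if_true, List.map_cons]
          simp
        · have hfM : ((f, s).1 == pvFMax xs b) = false := by
            simp only [beq_eq_false_iff_ne, ne_eq]; rw [he]; exact hb
          simp [hfM, hb]
      · have hlt : f < b := by omega
        have hM := pvFMax_le xs b
        have h1 : pvStep (b, acc) (f, s) = (b, acc) := by
          simp only [pvStep]
          rw [if_neg h, if_neg (by simp [he])]
        have hfM : ((f, s).1 == pvFMax xs b) = false := by
          simp only [beq_eq_false_iff_ne, ne_eq]; omega
        rw [List.foldl_cons, h1, ih]
        simp [hfM]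

-- ===== VERDICT (by name: the statement is the Claim_ definition above) =====
theorem MaxMap_spec : Claim_equal_MaxMap := by
  intro xs _
  show MaxMap xs = MaxMap_alt xs
  simp only [MaxMap, MaxMap_alt]
  rw [PySem.List.foldl_pyRange_zero_pyGetD' xs ((0 : Int), "")
    (fun m p => if p.1 > m then p.1 else m) (0 : Int)]
  have hM : xs.foldl (fun m p => if p.1 > m then p.1 else m) 0 = pvFMax xs 0 := rfl
  rw [hM]
  rw [PySem.List.foldl_pyRange_zero_pyGetD' xs ((0 : Int), "")
    (fun ret p => if p.1 == pvFMax xs 0 then ret ++ [p.2] else ret) ([] : List String)]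
  rw [PySem.List.foldl_append_if]
  have hS : (fun (st : Int × List String) p =>
      if p.1 > st.1 then (p.1, [p.2])
      else if p.1 == st.1 then (st.1, st.2 ++ [p.2]) else st) = pvStep := rfl
  rw [hS, pvFold_char xs 0 []]
  simp
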